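-- pv_equiv track=rewrite | github.com/Taeho25/Algorithm | Programmers/Lv.2/JadenCase 문자열 만들기.py | solution
-- ===== SOURCE A (Python) =====
-- def solution(s):
--     check_pre_blank = True
--     answer = ""
--     for word in s:
--         if word == ' ':
--             answer += word
--             check_pre_blank = True
--         else:
--             if check_pre_blank:
--                 answer += word.upper()
--             else:
--                 answer += word.lower()
--             check_pre_blank = False
--
--     return answer
-- ===== SOURCE B (Python) =====
-- def solution(s):
--     return ' '.join(w[:1].upper() + w[1:].lower() for w in s.split(' '))
-- ===== Notes on version B (the rewrite author's own statement) =====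
-- stated objective: idiomatic
-- what changed: Replaces A's character-by-character state machine (previous-was-blank flag, per-char string concatenation) with an idiomatic single-space split, a per-word transform w[:1].upper()+w[1:].lower(), and a join.
import Mathlib
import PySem

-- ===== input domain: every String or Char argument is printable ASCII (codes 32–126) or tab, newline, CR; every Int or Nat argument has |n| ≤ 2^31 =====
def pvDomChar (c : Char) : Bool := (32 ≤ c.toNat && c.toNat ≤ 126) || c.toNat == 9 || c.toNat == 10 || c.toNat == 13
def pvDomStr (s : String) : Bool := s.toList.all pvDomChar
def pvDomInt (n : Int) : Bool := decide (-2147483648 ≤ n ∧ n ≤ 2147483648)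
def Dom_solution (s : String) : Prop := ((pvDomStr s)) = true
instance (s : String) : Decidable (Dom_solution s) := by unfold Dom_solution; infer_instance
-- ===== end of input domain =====

-- B replaces A's per-character state machine with a split(' ')/transform/join over whole words (idiomatic; same result).

-- ===== PORT A =====
-- A: one pass over the characters with a 'previous was blank' flag, appending to `answer`.
def solution (s : String) : String :=
  let r := s.toList.foldl
    (fun (st : Bool × List Char) c =>
      if c = ' ' then (true, st.2 ++ [c])
      else (false, st.2 ++ [if st.1 then PySem.Chars.upperChar c else PySem.Chars.lowerChar c]))
    (true, [])
  String.ofList r.2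

-- ===== PORT B =====
-- B: ' '.join(w[:1].upper() + w[1:].lower() for w in s.split(' '))
def solution_alt (s : String) : String :=
  String.ofList (PySem.Chars.join [' ']
    ((PySem.Chars.splitOn s.toList [' ']).map
      (fun w => PySem.Chars.upper (PySem.List.slice w none (some 1)) ++
                PySem.Chars.lower (PySem.List.slice w (some 1) none))))

-- ===== PRECONDITION & SPEC =====
def Spec_solution (s : String) (out : String) : Prop := out = solution_alt s
instance (s : String) (out : String) : Decidable (Spec_solution s out) := by unfold Spec_solution; infer_instance

-- ===== CLAIM (what is proved, stated in full; the proofs are below) =====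
def Claim_equal_solution : Prop := ∀ (s : String), Dom_solution s → Spec_solution s (solution s)

-- ===== LEMMAS AND PROOFS =====

-- The per-word transform of B.
def pvF (w : List Char) : List Char :=
  PySem.Chars.upper (PySem.List.slice w none (some 1)) ++
  PySem.Chars.lower (PySem.List.slice w (some 1) none)

lemma pvF_nil : pvF [] = [] := by decide

lemma pvF_cons (c : Char) (w : List Char) :
    pvF (c :: w) = PySem.Chars.upperChar c :: PySem.Chars.lower w := by
  simp [pvF, PySem.List.slice, PySem.List.clampIdx, PySem.Chars.upper]

-- Structural characterisation of split(' ') for a single-char separator.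
def pvSplit : List Char → List (List Char)
  | [] => [[]]
  | c :: cs =>
    if c = ' ' then [] :: pvSplit cs
    else (c :: (pvSplit cs).headI) :: (pvSplit cs).tail

lemma pvSplit_ne_nil (cs : List Char) : pvSplit cs ≠ [] := by
  cases cs with
  | nil => simp [pvSplit]
  | cons c cs => simp only [pvSplit]; split <;> simp

lemma pvSplit_go (cs : List Char) : ∀ (fuel : Nat) (cur : List Char) (acc : List (List Char)),
    cs.length ≤ fuel →
    PySem.Chars.splitOn.go [' '] fuel cs cur acc
      = acc.reverse ++ (pvSplit cs).modifyHead (fun h => cur.reverse ++ h) := by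
  induction cs with
  | nil =>
    intro fuel cur acc _
    cases fuel <;> simp [PySem.Chars.splitOn.go, pvSplit]
  | cons c cs ih =>
    intro fuel cur acc hle
    cases fuel with
    | zero => simp at hle
    | succ fuel =>
      by_cases hc : c = ' '
      · subst hc
        have hpre : [' '].isPrefixOf (' ' :: cs) = true := by simp [List.isPrefixOf]
        rw [PySem.Chars.splitOn.go]
        simp only [hpre, if_pos, List.length_cons, List.length_nil, List.drop_succ_cons,
          List.drop_zero]
        rw [ih fuel [] (cur.reverse :: acc) (by simpa using Nat.le_of_succ_le_succ hle)]
        obtain ⟨h, t, ht⟩ : ∃ h t, pvSplit cs = h :: t := by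
          cases e : pvSplit cs with
          | nil => exact absurd e (pvSplit_ne_nil cs)
          | cons h t => exact ⟨h, t, rfl⟩
        simp [pvSplit, ht]
      · have hpre : [' '].isPrefixOf (c :: cs) = false := by
          simp [List.isPrefixOf]
          exact fun e => hc e.symm
        rw [PySem.Chars.splitOn.go]
        simp only [hpre, Bool.false_eq_true, if_false]
        rw [ih fuel (c :: cur) acc (by simpa using Nat.le_of_succ_le_succ hle)]
        obtain ⟨h, t, ht⟩ : ∃ h t, pvSplit cs = h :: t := by
          cases e : pvSplit cs with
          | nil => exact absurd e (pvSplit_ne_nil cs)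
          | cons h t => exact ⟨h, t, rfl⟩
        simp [pvSplit, ht, hc]

lemma splitOn_eq_pvSplit (cs : List Char) :
    PySem.Chars.splitOn cs [' '] = pvSplit cs := by
  have h := pvSplit_go cs (cs.length + 1) [] [] (by omega)
  simp only [List.reverse_nil, List.nil_append] at h
  rw [show PySem.Chars.splitOn cs [' '] = PySem.Chars.splitOn.go [' '] (cs.length + 1) cs [] [] from rfl, h]
  cases pvSplit cs <;> simp

-- join with a single-space separator, unrolled.
def pvTailJoin (ws : List (List Char)) : List Char :=
  (ws.map (fun w => ' ' :: pvF w)).flatten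

lemma join_map_eq (w : List Char) (ws : List (List Char)) :
    PySem.Chars.join [' '] ((w :: ws).map pvF) = pvF w ++ pvTailJoin ws := by
  induction ws generalizing w with
  | nil => simp [PySem.Chars.join, pvTailJoin, List.intercalate]
  | cons v ws ih =>
    have := ih v
    simp only [PySem.Chars.join, List.intercalate, List.map_cons, List.intersperse,
      List.flatten] at this ⊢
    simp [pvTailJoin, List.map_cons] at this ⊢
    simp [this]

-- A's loop, written structurally (front-first); linked to the foldl below.
def pvLoop : Bool → List Char → List Char
  | _, [] => []
  | pre, c :: cs =>
    if c = ' ' then c :: pvLoop true cs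
    else (if pre then PySem.Chars.upperChar c else PySem.Chars.lowerChar c) :: pvLoop false cs

lemma foldl_eq_pvLoop (cs : List Char) : ∀ (pre : Bool) (acc : List Char),
    (cs.foldl
      (fun (st : Bool × List Char) c =>
        if c = ' ' then (true, st.2 ++ [c])
        else (false, st.2 ++ [if st.1 then PySem.Chars.upperChar c else PySem.Chars.lowerChar c]))
      (pre, acc)).2 = acc ++ pvLoop pre cs := by
  induction cs with
  | nil => intro pre acc; simp [pvLoop]
  | cons c cs ih =>
    intro pre acc
    by_cases hc : c = ' '
    · simp [List.foldl_cons, hc, pvLoop, ih]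
    · simp [List.foldl_cons, hc, pvLoop, ih]

-- The central invariant: both states of A's machine, against the split of the rest.
lemma pvLoop_eq (cs : List Char) :
    pvLoop true cs = pvF (pvSplit cs).headI ++ pvTailJoin (pvSplit cs).tail ∧
    pvLoop false cs
      = PySem.Chars.lower (pvSplit cs).headI ++ pvTailJoin (pvSplit cs).tail := by
  induction cs with
  | nil => simp [pvLoop, pvSplit, pvTailJoin, pvF_nil, PySem.Chars.lower]
  | cons c cs ih =>
    obtain ⟨h, t, ht⟩ : ∃ h t, pvSplit cs = h :: t := by
      cases e : pvSplit cs with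
      | nil => exact absurd e (pvSplit_ne_nil cs)
      | cons h t => exact ⟨h, t, rfl⟩
    by_cases hc : c = ' '
    · subst hc
      constructor <;>
        simp [pvLoop, pvSplit, ht, pvF_nil, pvTailJoin, ih.1, PySem.Chars.lower]
    · constructor
      · simp [pvLoop, hc, pvSplit, ht, pvF_cons, ih.2]
      · simp [pvLoop, hc, pvSplit, ht, PySem.Chars.lower, ih.2]

-- ===== VERDICT (by name: the statement is the Claim_ definition above) =====
theorem solution_spec : Claim_equal_solution := by
  intro s _
  show _ = _
  have hsplit := splitOn_eq_pvSplit s.toList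
  obtain ⟨h, t, ht⟩ : ∃ h t, pvSplit s.toList = h :: t := by
    cases e : pvSplit s.toList with
    | nil => exact absurd e (pvSplit_ne_nil _)
    | cons h t => exact ⟨h, t, rfl⟩
  have hmap : ((PySem.Chars.splitOn s.toList [' ']).map
      (fun w => PySem.Chars.upper (PySem.List.slice w none (some 1)) ++
                PySem.Chars.lower (PySem.List.slice w (some 1) none)))
      = (h :: t).map pvF := by
    rw [hsplit, ht]; rfl
  have hloop := foldl_eq_pvLoop s.toList true []
  have hmain := (pvLoop_eq s.toList).1
  rw [ht] at hmain
  simp only [solution, solution_alt, hmap, join_map_eq, hloop, List.nil_append, hmain, List.headI, List.tail_cons]
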